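-- pv_equiv track=rewrite | github.com/ydbilgin/ML-HeuristicOptimization-Engineering-StudentProjects-2025 | Students/Yasin_Derya_Bilgin/src/run_vrp.py | even_cuts
-- ===== SOURCE A (Python) =====
-- def even_cuts(n_customers: int, vehicles: int) -> list[int]:
--     vehicles = max(1, min(vehicles, n_customers))
--     if vehicles <= 1:
--         return []
--     base = n_customers // vehicles
--     rem = n_customers % vehicles
--     cuts: list[int] = []
--     acc = 0
--     for i in range(vehicles - 1):
--         acc += base + (1 if i < rem else 0)
--         cuts.append(acc)
--     return cuts
-- ===== SOURCE B (Python) =====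
-- def even_cuts(n_customers: int, vehicles: int) -> list[int]:
--     vehicles = max(1, min(vehicles, n_customers))
--     if vehicles <= 1:
--         return []
--     base = n_customers // vehicles
--     rem = n_customers % vehicles
--     heavy = [(base + 1) * j for j in range(1, rem + 1)]
--     light = [rem + base * j for j in range(rem + 1, vehicles)]
--     return heavy + light
-- ===== Notes on version B (the rewrite author's own statement) =====
-- stated objective: alternative
-- what changed: Replaces the single loop threading a running accumulator with two staged comprehensions built from closed forms -- the heavy cuts (base+1)*j for j<=rem and the light cuts rem+base*j for j>rem -- concatenated; no running state at all.
import Mathlib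
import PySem

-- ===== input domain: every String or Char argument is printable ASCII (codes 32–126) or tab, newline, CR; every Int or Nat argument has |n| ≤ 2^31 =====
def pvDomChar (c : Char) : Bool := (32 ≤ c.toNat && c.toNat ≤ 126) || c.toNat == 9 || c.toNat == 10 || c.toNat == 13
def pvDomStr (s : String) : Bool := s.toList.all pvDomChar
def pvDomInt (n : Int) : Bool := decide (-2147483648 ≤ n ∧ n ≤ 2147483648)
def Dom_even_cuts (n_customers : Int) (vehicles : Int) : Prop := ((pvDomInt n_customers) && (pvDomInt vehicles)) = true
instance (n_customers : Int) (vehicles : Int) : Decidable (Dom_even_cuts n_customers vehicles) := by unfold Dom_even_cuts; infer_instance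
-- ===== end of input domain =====

-- B replaces A's running-accumulator loop with two staged comprehensions: the heavy cuts (base+1)*j for j ≤ rem, then the light cuts rem + base*j, concatenated (objective: alternative decomposition; same cost).


-- ===== PORT A =====
def even_cuts (n_customers : Int) (vehicles : Int) : List Int :=
  let v : Int := max 1 (min vehicles n_customers)
  if v ≤ 1 then []
  else
    let base := PySem.Int.floordiv n_customers v
    let rem := PySem.Int.mod n_customers v
    ((PySem.List.pyRange 0 (v - 1) 1).foldl
      (fun (st : Int × List Int) i =>
        let acc := st.1 + base + (if i < rem then 1 else 0)
        (acc, st.2 ++ [acc]))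
      (0, [])).2

-- ===== PORT B =====
def even_cuts_alt (n_customers : Int) (vehicles : Int) : List Int :=
  let v : Int := max 1 (min vehicles n_customers)
  if v ≤ 1 then []
  else
    let base := PySem.Int.floordiv n_customers v
    let rem := PySem.Int.mod n_customers v
    let heavy := (PySem.List.pyRange 1 (rem + 1) 1).map (fun j => (base + 1) * j)
    let light := (PySem.List.pyRange (rem + 1) v 1).map (fun j => rem + base * j)
    heavy ++ light

-- ===== PRECONDITION & SPEC =====
def Spec_even_cuts (n_customers : Int) (vehicles : Int) (out : List Int) : Prop := out = even_cuts_alt n_customers vehicles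
instance (n_customers : Int) (vehicles : Int) (out : List Int) : Decidable (Spec_even_cuts n_customers vehicles out) := by unfold Spec_even_cuts; infer_instance

-- ===== CLAIM (what is proved, stated in full; the proofs are below) =====
def Claim_equal_even_cuts : Prop := ∀ (n_customers : Int) (vehicles : Int), Dom_even_cuts n_customers vehicles → Spec_even_cuts n_customers vehicles (even_cuts n_customers vehicles)

-- ===== LEMMAS AND PROOFS =====

-- Loop invariant: A's accumulator-threading fold over range k equals the pair
-- (closed-form accumulator, map of the closed form).
theorem even_cuts_loop (base rem : Int) (hrem : 0 ≤ rem) (k : Nat) :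
    (PySem.List.pyRange 0 k 1).foldl
      (fun (st : Int × List Int) i =>
        let acc := st.1 + base + (if i < rem then 1 else 0)
        (acc, st.2 ++ [acc]))
      (0, [])
    = (base * k + min (k : Int) rem,
       (PySem.List.pyRange 0 k 1).map (fun i => base * (i + 1) + min (i + 1) rem)) := by
  induction k with
  | zero => simp [PySem.List.pyRange_one_eq_nil, min_eq_left hrem]
  | succ k ih =>
    have h : ((k : Int) + 1) = ((k + 1 : Nat) : Int) := by push_cast; ring
    have hr : PySem.List.pyRange 0 ((k + 1 : Nat) : Int) 1
        = PySem.List.pyRange 0 (k : Int) 1 ++ [(k : Int)] := by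
      rw [← h, PySem.List.pyRange_one_succ_right (by exact_mod_cast Nat.zero_le k)]
    rw [hr, List.foldl_append, ih, List.map_append]
    simp only [List.foldl_cons, List.foldl_nil, List.map_cons, List.map_nil, Prod.mk.injEq]
    have key : base * (k : Int) + min (k : Int) rem + base + (if (k : Int) < rem then 1 else 0)
        = base * ((k : Int) + 1) + min ((k : Int) + 1) rem := by
      rcases le_or_gt rem (k : Int) with hle | hlt
      · rw [if_neg (by omega), min_eq_right hle, min_eq_right (by omega)]; ring
      · rw [if_pos hlt, min_eq_left (le_of_lt hlt), min_eq_left (by omega)]; ring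
    constructor
    · push_cast; exact key
    · congr 1; rw [key]

-- Shifting a unit range by one under a map.
theorem map_range_shift (a b : Int) (g : Int → Int) :
    (PySem.List.pyRange a b 1).map (fun i => g (i + 1))
      = (PySem.List.pyRange (a + 1) (b + 1) 1).map g := by
  rw [PySem.List.pyRange_one, PySem.List.pyRange_one]
  have : (b + 1 - (a + 1)) = b - a := by ring
  rw [this]
  simp only [List.map_map]
  apply List.map_congr_left
  intro k _
  simp only [Function.comp]
  congr 1
  ring

-- The closed-form map over range 0..k splits at rem into the two staged segments.
theorem closed_form_split (base rem k : Int) (h0 : 0 ≤ rem) (hk : rem ≤ k) :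
    (PySem.List.pyRange 0 k 1).map (fun i => base * (i + 1) + min (i + 1) rem)
      = (PySem.List.pyRange 1 (rem + 1) 1).map (fun j => (base + 1) * j)
        ++ (PySem.List.pyRange (rem + 1) (k + 1) 1).map (fun j => rem + base * j) := by
  rw [PySem.List.pyRange_one_append 0 rem k h0 hk, List.map_append]
  congr 1
  · have hs := map_range_shift 0 rem (fun j => (base + 1) * j)
    rw [show (0:Int) + 1 = 1 by ring] at hs
    rw [← hs]
    apply List.map_congr_left
    intro i hi
    rw [PySem.List.mem_pyRange_one] at hi
    rw [min_eq_left (by omega)]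
    ring
  · have hs := map_range_shift rem k (fun j => rem + base * j)
    rw [← hs]
    apply List.map_congr_left
    intro i hi
    rw [PySem.List.mem_pyRange_one] at hi
    rw [min_eq_right (by omega)]
    ring

-- ===== VERDICT (by name: the statement is the Claim_ definition above) =====
theorem even_cuts_spec : Claim_equal_even_cuts := by
  intro n v _
  unfold Spec_even_cuts even_cuts even_cuts_alt
  set w : Int := max 1 (min v n) with hw
  by_cases hle : w ≤ 1
  · simp [hle]
  · simp only [if_neg hle]
    have h1 : (1:Int) ≤ w := le_max_left _ _
    have hwpos : (0:Int) < w := by omega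
    have hrem0 : 0 ≤ PySem.Int.mod n w := PySem.Int.mod_nonneg _ hwpos
    have hremw : PySem.Int.mod n w < w := PySem.Int.mod_lt _ hwpos
    have hk : w - 1 = ((w - 1).toNat : Int) := by omega
    rw [hk, even_cuts_loop _ _ hrem0]
    rw [← hk, closed_form_split _ _ _ hrem0 (by omega)]
    rw [show w - 1 + 1 = w by ring]
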